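-- pv_equiv track=rewrite | github.com/HackRx-6/RIVALS | gen_code/code_f228ac9661114355beca1e3ccf3afaae.py | kth_palindromic_permutation
-- ===== SOURCE A (Python) =====
-- from math import factorial
-- from collections import Counter
--
-- def kth_palindromic_permutation(s, k):
--     def count_palindromic_permutations(half_counter):
--         total = sum(half_counter.values())
--         denom = 1
--         for v in half_counter.values():
--             denom *= factorial(v)
--         return factorial(total) // denom
--
--     counter = Counter(s)
--     odd_chars = [ch for ch, cnt in counter.items() if cnt % 2 == 1]
--     if len(odd_chars) > 1:
--         return ''
--     half_counter = {ch: cnt // 2 for ch, cnt in counter.items()}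
--     half_chars = []
--     for ch in sorted(half_counter):
--         half_chars.extend([ch] * half_counter[ch])
--     n = len(half_chars)
--     used = Counter()
--     result = []
--     k -= 1
--     while len(result) < n:
--         for ch in sorted(half_counter):
--             if used[ch] < half_counter[ch]:
--                 used[ch] += 1
--                 perms = count_palindromic_permutations(Counter({c: half_counter[c] - used[c] for c in half_counter}))
--                 if k < perms:
--                     result.append(ch)
--                     break
--                 else:
--                     k -= perms
--                     used[ch] -= 1
--     half = ''.join(result)
--     mid = odd_chars[0] if odd_chars else ''
--     return half + mid + half[::-1]
-- ===== SOURCE B (Python) =====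
-- def kth_palindromic_permutation(s, k):
--     cnt = {}
--     for ch in s:
--         cnt[ch] = cnt.get(ch, 0) + 1
--     odd = [ch for ch, c in cnt.items() if c % 2 == 1]
--     if len(odd) > 1:
--         return ''
--     half = [(ch, cnt[ch] // 2) for ch in sorted(cnt)]
--     t = sum(c for _, c in half)
--     # factorial table, built once
--     fact = [1] * (t + 1)
--     for i in range(1, t + 1):
--         fact[i] = fact[i - 1] * i
--     denom = 1
--     for _, c in half:
--         denom *= fact[c]
--     rem = fact[t] // denom          # multiset-permutation count of the half
--     counts = dict(half)
--     out = []
--     k -= 1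
--     if k >= rem:
--         k %= rem            # A wraps an out-of-range rank around; rem >= 1
--     while t > 0:
--         for ch, _ in half:
--             c = counts[ch]
--             if c == 0:
--                 continue
--             perms = rem * c // t    # permutations starting with ch (exact)
--             if k < perms:
--                 out.append(ch)
--                 counts[ch] = c - 1
--                 rem = perms
--                 t -= 1
--                 break
--             k -= perms
--         else:
--             return ''               # unreachable: k < rem is a loop invariant
--     half_str = ''.join(out)
--     mid = odd[0] if odd else ''
--     return half_str + mid + half_str[::-1]
-- ===== Notes on version B (the rewrite author's own statement) =====
-- stated objective: faster
-- what changed: B precomputes a factorial table, wraps the rank modulo the total permutation count once up front, and maintains the remaining multiset-permutation count incrementally (perms = rem*c//t per candidate) instead of rebuilding a Counter and recomputing factorials from scratch for every candidate at every position as A does.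
import Mathlib
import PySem

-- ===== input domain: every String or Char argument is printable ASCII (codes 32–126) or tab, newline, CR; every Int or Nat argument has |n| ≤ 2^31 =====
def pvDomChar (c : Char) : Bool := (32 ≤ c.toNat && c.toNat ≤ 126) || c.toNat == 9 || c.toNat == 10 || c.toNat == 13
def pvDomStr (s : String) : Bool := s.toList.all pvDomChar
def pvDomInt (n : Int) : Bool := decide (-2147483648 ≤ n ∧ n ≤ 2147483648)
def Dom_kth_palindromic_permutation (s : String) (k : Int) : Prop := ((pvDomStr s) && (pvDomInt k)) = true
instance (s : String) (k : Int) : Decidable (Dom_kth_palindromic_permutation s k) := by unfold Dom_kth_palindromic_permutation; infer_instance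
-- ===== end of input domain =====

-- B replaces A's per-candidate Counter rebuild + factorial recomputation by a precomputed
-- factorial table and an incrementally maintained permutation count (measured faster).


-- ===== PORT A =====
-- math.factorial; every call site below passes a nonnegative value, where this is exact
def pvFact (v : Int) : Int := (Nat.factorial v.toNat : Int)

-- count_palindromic_permutations(half_counter)
def pvCountPal (hc : PySem.Dict Char Int) : Int :=
  let total := hc.values.sum
  let denom := hc.values.foldl (fun d v => d * pvFact v) 1
  PySem.Int.floordiv (pvFact total) denom

-- Counter({c: half_counter[c] - used[c] for c in half_counter})
def pvRemDict (hc used1 : PySem.Dict Char Int) : PySem.Dict Char Int :=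
  hc.items.foldl (fun d p => d.insert p.1 (hc.getD p.1 0 - used1.getD p.1 0)) PySem.Dict.empty

-- the inner `for ch in sorted(half_counter):` pass; `Sum.inl` = the for-loop finished without
-- break (carrying the k the pass lowered and the used dict), `Sum.inr` = break
def pvInnerA (hc : PySem.Dict Char Int) (used : PySem.Dict Char Int)
    (result : List Char) (k : Int) :
    List Char → (PySem.Dict Char Int × Int) ⊕ (PySem.Dict Char Int × List Char × Int)
  | [] => Sum.inl (used, k)
  | ch :: rest =>
    if used.getD ch 0 < hc.getD ch 0 then
      let used1 := used.insert ch (used.getD ch 0 + 1)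
      let perms := pvCountPal (pvRemDict hc used1)
      if k < perms then Sum.inr (used1, result ++ [ch], k)
      else pvInnerA hc (used1.insert ch (used1.getD ch 0 - 1)) result (k - perms) rest
    else pvInnerA hc used result k rest

-- the `while len(result) < n:` loop: each iteration either appends one character (at most n
-- times) or is a full pass that lowers k by at least 1 (at most (k-1).toNat + 1 times before
-- k goes negative, after which every pass appends), so fuel = n + (k-1).toNat + 1 always
-- outlasts the Python loop and the guard, not the fuel, ends the recursion
def pvLoopA (hc : PySem.Dict Char Int) (n : Nat) :
    Nat → PySem.Dict Char Int → List Char → Int → List Char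
  | 0, _, result, _ => result
  | fuel + 1, used, result, k =>
    if result.length < n then
      match pvInnerA hc used result k (PySem.List.sorted hc.keys (fun x => x)) with
      | Sum.inr (u1, r1, k1) => pvLoopA hc n fuel u1 r1 k1
      | Sum.inl (u1, k1) => pvLoopA hc n fuel u1 result k1
    else result

def kth_palindromic_permutation (s : String) (k : Int) : String :=
  let counter := PySem.Dict.counter s.toList
  let odd_chars := (counter.items.filter (fun p => PySem.Int.mod p.2 2 == 1)).map Prod.fst
  if odd_chars.length > 1 then "" else
    let hc := counter.items.foldl
      (fun d p => d.insert p.1 (PySem.Int.floordiv p.2 2)) PySem.Dict.empty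
    let half_chars := (PySem.List.sorted hc.keys (fun x => x)).foldl
      (fun acc ch => acc ++ List.replicate (hc.getD ch 0).toNat ch) []
    let n := half_chars.length
    let result := pvLoopA hc n (n + (k - 1).toNat + 1) PySem.Dict.empty [] (k - 1)
    let mid : List Char := match odd_chars with | [] => [] | c :: _ => [c]
    String.ofList (result ++ mid ++ result.reverse)

-- ===== PORT B =====
-- fact = [1]*(t+1); for i in range(1, t+1): fact[i] = fact[i-1]*i
def pvFactTable (t : Int) : List Int :=
  (PySem.List.pyRange 1 (t + 1) 1).foldl
    (fun f i => f.set i.toNat (PySem.List.pyGetD f (i - 1) 0 * i))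
    (List.replicate (t + 1).toNat 1)

-- the inner `for ch, _ in half:` pass; result = (counts', ch, k', rem'); `none` = for-else
-- counts[ch] cannot raise (every scanned ch is a key of counts): ported with getD
def pvInnerB (counts : PySem.Dict Char Int) (k rem t : Int) :
    List (Char × Int) → Option (PySem.Dict Char Int × Char × Int × Int)
  | [] => none
  | (ch, _) :: rest =>
    let c := counts.getD ch 0
    if c = 0 then pvInnerB counts k rem t rest
    else
      let perms := PySem.Int.floordiv (rem * c) t
      if k < perms then some (counts.insert ch (c - 1), ch, k, perms)
      else pvInnerB counts (k - perms) rem t rest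

-- the `while t > 0:` loop; fuel = t.toNat (t drops by 1 per iteration); `none` = `return ''`
def pvLoopB (half : List (Char × Int)) :
    Nat → PySem.Dict Char Int → List Char → Int → Int → Int → Option (List Char)
  | 0, _, out, _, _, _ => some out
  | fuel + 1, counts, out, k, rem, t =>
    if 0 < t then
      match pvInnerB counts k rem t half with
      | some (c1, ch, k1, rem1) => pvLoopB half fuel c1 (out ++ [ch]) k1 rem1 (t - 1)
      | none => none
    else some out

def kth_palindromic_permutation_alt (s : String) (k : Int) : String :=
  let cnt := s.toList.foldl (fun d ch => d.insert ch (d.getD ch 0 + 1)) PySem.Dict.empty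
  let odd := (cnt.items.filter (fun p => PySem.Int.mod p.2 2 == 1)).map Prod.fst
  if odd.length > 1 then "" else
    let half := (PySem.List.sorted cnt.keys (fun x => x)).map
      (fun ch => (ch, PySem.Int.floordiv (cnt.getD ch 0) 2))
    let t := (half.map Prod.snd).sum
    let fact := pvFactTable t
    let denom := half.foldl (fun d p => d * PySem.List.pyGetD fact p.2 0) 1
    let rem := PySem.Int.floordiv (PySem.List.pyGetD fact t 0) denom
    let counts := PySem.Dict.ofList half
    -- k -= 1; if k >= rem: k %= rem
    let k1 := if rem ≤ k - 1 then PySem.Int.mod (k - 1) rem else k - 1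
    match pvLoopB half t.toNat counts [] k1 rem t with
    | none => ""
    | some out =>
      let mid : List Char := match odd with | [] => [] | c :: _ => [c]
      String.ofList (out ++ mid ++ out.reverse)

-- ===== PRECONDITION & SPEC ===== (both programs are total: no Pre_)
def Spec_kth_palindromic_permutation (s : String) (k : Int) (out : String) : Prop := out = kth_palindromic_permutation_alt s k
instance (s : String) (k : Int) (out : String) : Decidable (Spec_kth_palindromic_permutation s k out) := by unfold Spec_kth_palindromic_permutation; infer_instance

-- ===== CLAIM (what is proved, stated in full; the proofs are below) =====
def Claim_equal_kth_palindromic_permutation : Prop := ∀ (s : String) (k : Int), Dom_kth_palindromic_permutation s k → Spec_kth_palindromic_permutation s k (kth_palindromic_permutation s k)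

-- ===== LEMMAS AND PROOFS =====

-- multinomial coefficient: number of distinct arrangements of a multiset given by counts l
def pvMulti (l : List Nat) : Nat := l.sum.factorial / (l.map Nat.factorial).prod

-- ---- abstract model: fixed sorted key list K, half counts h, used counts u ----
def pvR (h u : Char → Nat) (c : Char) : Nat := h c - u c
def pvT (K : List Char) (h u : Char → Nat) : Nat := (K.map (pvR h u)).sum
def pvM (K : List Char) (h u : Char → Nat) : Nat := pvMulti (K.map (pvR h u))
def pvBump (u : Char → Nat) (ch : Char) : Char → Nat := fun c => if c = ch then u c + 1 else u c

-- the abstract inner scan both ports implement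
def pvScan (K : List Char) (h u : Char → Nat) : List Char → Int → Option (Char × Int)
  | [], _ => none
  | ch :: rest, k =>
    if u ch < h ch then
      if k < (pvM K h (pvBump u ch) : Int) then some (ch, k)
      else pvScan K h u rest (k - (pvM K h (pvBump u ch) : Int))
    else pvScan K h u rest k

-- ---- multinomial arithmetic ----
theorem pvMulti_dvd (l : List Nat) : (l.map Nat.factorial).prod ∣ l.sum.factorial := by
  induction l with
  | nil => simp
  | cons a t ih =>
    simp only [List.map_cons, List.prod_cons, List.sum_cons]
    exact dvd_trans (mul_dvd_mul_left _ ih)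
      (Nat.factorial_mul_factorial_dvd_factorial_add a t.sum)

theorem pvMulti_mul (l : List Nat) :
    pvMulti l * (l.map Nat.factorial).prod = l.sum.factorial := by
  exact Nat.div_mul_cancel (pvMulti_dvd l)

theorem pvMulti_dec (l1 l2 : List Nat) (c : Nat) :
    pvMulti (l1 ++ (c + 1) :: l2) * (c + 1)
      = (l1 ++ (c + 1) :: l2).sum * pvMulti (l1 ++ c :: l2) := by
  have hDpos : 0 < ((l1 ++ c :: l2).map Nat.factorial).prod := by
    apply List.prod_pos
    intro x hx
    obtain ⟨a, _, rfl⟩ := List.mem_map.mp hx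
    exact Nat.factorial_pos a
  apply Nat.eq_of_mul_eq_mul_right hDpos
  have hD : ((l1 ++ (c + 1) :: l2).map Nat.factorial).prod
      = ((l1 ++ c :: l2).map Nat.factorial).prod * (c + 1) := by
    simp only [List.map_append, List.map_cons, List.prod_append, List.prod_cons,
      Nat.factorial_succ]
    ring
  have hS : (l1 ++ (c + 1) :: l2).sum = (l1 ++ c :: l2).sum + 1 := by
    simp only [List.sum_append, List.sum_cons]
    omega
  calc pvMulti (l1 ++ (c + 1) :: l2) * (c + 1) * ((l1 ++ c :: l2).map Nat.factorial).prod
      = pvMulti (l1 ++ (c + 1) :: l2) * (((l1 ++ c :: l2).map Nat.factorial).prod * (c + 1)) := by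
        ring
    _ = pvMulti (l1 ++ (c + 1) :: l2) * ((l1 ++ (c + 1) :: l2).map Nat.factorial).prod := by
        rw [hD]
    _ = (l1 ++ (c + 1) :: l2).sum.factorial := pvMulti_mul _
    _ = ((l1 ++ c :: l2).sum + 1).factorial := by rw [hS]
    _ = ((l1 ++ c :: l2).sum + 1) * (l1 ++ c :: l2).sum.factorial := Nat.factorial_succ _
    _ = ((l1 ++ c :: l2).sum + 1)
          * (pvMulti (l1 ++ c :: l2) * ((l1 ++ c :: l2).map Nat.factorial).prod) := by
        rw [pvMulti_mul]
    _ = (l1 ++ (c + 1) :: l2).sum * pvMulti (l1 ++ c :: l2)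
          * ((l1 ++ c :: l2).map Nat.factorial).prod := by rw [hS]; ring

theorem pvSplit (K : List Char) (h u : Char → Nat) (ch : Char)
    (hmem : ch ∈ K) (hnd : K.Nodup) :
    ∃ K1 K2 : List Char,
      K.map (pvR h u) = K1.map (pvR h u) ++ pvR h u ch :: K2.map (pvR h u)
      ∧ K.map (pvR h (pvBump u ch))
          = K1.map (pvR h u) ++ pvR h (pvBump u ch) ch :: K2.map (pvR h u) := by
  obtain ⟨K1, K2, rfl⟩ := List.append_of_mem hmem
  have hne : ∀ c, c ∈ K1 ∨ c ∈ K2 → c ≠ ch := by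
    intro c hc hceq
    subst hceq
    have hmid := List.nodup_middle.mp hnd
    rw [List.nodup_cons] at hmid
    exact hmid.1 (List.mem_append.mpr hc)
  have hcongr : ∀ (l : List Char), (∀ c ∈ l, c ≠ ch) →
      l.map (pvR h (pvBump u ch)) = l.map (pvR h u) := by
    intro l hl
    apply List.map_congr_left
    intro c hc
    simp [pvR, pvBump, hl c hc]
  refine ⟨K1, K2, by simp, ?_⟩
  simp only [List.map_append, List.map_cons]
  rw [hcongr K1 (fun c hc => hne c (Or.inl hc)), hcongr K2 (fun c hc => hne c (Or.inr hc))]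

theorem pvM_bump (K : List Char) (h u : Char → Nat) (ch : Char)
    (hmem : ch ∈ K) (hnd : K.Nodup) (hlt : u ch < h ch) :
    pvM K h u * pvR h u ch = pvT K h u * pvM K h (pvBump u ch) := by
  obtain ⟨K1, K2, hmap, hmapb⟩ := pvSplit K h u ch hmem hnd
  obtain ⟨c, hc⟩ : ∃ c, pvR h u ch = c + 1 := ⟨pvR h u ch - 1, by unfold pvR; omega⟩
  have hrb : pvR h (pvBump u ch) ch = c := by
    unfold pvR at hc ⊢
    unfold pvBump
    rw [if_pos rfl]
    omega
  unfold pvM pvT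
  rw [hmap, hmapb, hrb, hc]
  exact pvMulti_dec _ _ c

theorem pvT_bump (K : List Char) (h u : Char → Nat) (ch : Char)
    (hmem : ch ∈ K) (hnd : K.Nodup) (hlt : u ch < h ch) :
    pvT K h (pvBump u ch) = pvT K h u - 1 := by
  obtain ⟨K1, K2, hmap, hmapb⟩ := pvSplit K h u ch hmem hnd
  have hrb : pvR h (pvBump u ch) ch = pvR h u ch - 1 := by
    unfold pvR pvBump
    rw [if_pos rfl]
    omega
  have hr : 0 < pvR h u ch := by unfold pvR; omega
  unfold pvT
  rw [hmap, hmapb, hrb]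
  simp only [List.sum_append, List.sum_cons]
  omega

theorem pvFilterSum (r : Char → Nat) (p : Char → Bool) (l : List Char)
    (h0 : ∀ c ∈ l, p c = false → r c = 0) :
    ((l.filter p).map r).sum = (l.map r).sum := by
  induction l with
  | nil => simp
  | cons c rest ih =>
    have ih' := ih (fun x hx => h0 x (List.mem_cons_of_mem c hx))
    cases hp : p c with
    | true => simp [hp, ih']
    | false =>
      simp only [List.filter_cons, hp, Bool.false_eq_true, if_false, List.map_cons,
        List.sum_cons, ih', h0 c List.mem_cons_self hp]
      omega

theorem pvChildrenAux (K : List Char) (h u : Char → Nat) (hnd : K.Nodup) :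
    ∀ keys : List Char, (∀ c ∈ keys, c ∈ K) →
    ((keys.filter (fun c => decide (u c < h c))).map (fun c => pvM K h (pvBump u c))).sum
        * pvT K h u
      = pvM K h u * ((keys.filter (fun c => decide (u c < h c))).map (pvR h u)).sum := by
  intro keys
  induction keys with
  | nil => simp
  | cons c rest ih =>
    intro hsub
    have ih' := ih (fun x hx => hsub x (List.mem_cons_of_mem c hx))
    by_cases hp : u c < h c
    · rw [List.filter_cons_of_pos (by simpa using hp), List.map_cons, List.sum_cons,
        List.map_cons, List.sum_cons]
      rw [Nat.add_mul, ih', Nat.mul_add]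
      congr 1
      rw [mul_comm, ← pvM_bump K h u c (hsub c List.mem_cons_self) hnd hp, mul_comm]
    · rw [List.filter_cons_of_neg (by simpa using hp)]
      exact ih'

theorem pvScan_children (K : List Char) (h u : Char → Nat)
    (hnd : K.Nodup) (hT : 0 < pvT K h u) :
    ((K.filter (fun c => decide (u c < h c))).map (fun c => pvM K h (pvBump u c))).sum
      = pvM K h u := by
  apply Nat.eq_of_mul_eq_mul_right hT
  rw [pvChildrenAux K h u hnd K (fun _ hc => hc)]
  rw [pvFilterSum (pvR h u) _ K (fun c _ hp => by simp [pvR] at hp ⊢; omega)]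
  rfl

theorem pvMulti_pos (l : List Nat) : 0 < pvMulti l := by
  have hp : 0 < (l.map Nat.factorial).prod := by
    apply List.prod_pos
    intro x hx
    obtain ⟨a, _, rfl⟩ := List.mem_map.mp hx
    exact Nat.factorial_pos a
  exact Nat.div_pos (Nat.le_of_dvd l.sum.factorial_pos (pvMulti_dvd l)) hp

theorem pvScan_none_le (K : List Char) (h u : Char → Nat) :
    ∀ keys k, pvScan K h u keys k = none →
      (((keys.filter (fun c => decide (u c < h c))).map
          (fun c => pvM K h (pvBump u c))).sum : Int) ≤ k
      ∨ keys.filter (fun c => decide (u c < h c)) = [] := by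
  intro keys
  induction keys with
  | nil => intro k _; right; rfl
  | cons c rest ih =>
    intro k hnone
    by_cases hp : u c < h c
    · simp only [pvScan, if_pos hp] at hnone
      by_cases hk : k < (pvM K h (pvBump u c) : Int)
      · simp [if_pos hk] at hnone
      · simp only [if_neg hk] at hnone
        left
        rw [List.filter_cons_of_pos (by simpa using hp), List.map_cons, List.sum_cons]
        rcases ih _ hnone with hle | hempty
        · omega
        · rw [hempty]
          simp only [List.map_nil, List.sum_nil, Nat.add_zero]
          omega
    · simp only [pvScan, if_neg hp] at hnone
      rw [List.filter_cons_of_neg (by simpa using hp)]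
      exact ih _ hnone

-- under the loop invariant k < pvM the scan over the whole key list cannot fail
theorem pvScan_total (K : List Char) (h u : Char → Nat) (k : Int)
    (hnd : K.Nodup) (hT : 0 < pvT K h u) (hk : k < (pvM K h u : Int)) :
    ∃ ch k', pvScan K h u K k = some (ch, k') := by
  cases hsc : pvScan K h u K k with
  | some p => exact ⟨p.1, p.2, by simp⟩
  | none =>
    exfalso
    have hch := pvScan_children K h u hnd hT
    have hMpos : 0 < pvM K h u := pvMulti_pos _
    rcases pvScan_none_le K h u K k hsc with hle | hempty
    · rw [hch] at hle
      omega
    · rw [hempty] at hch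
      simp at hch
      omega

theorem pvScan_some (K : List Char) (h u : Char → Nat) :
    ∀ keys k ch k', pvScan K h u keys k = some (ch, k') →
      ch ∈ keys ∧ u ch < h ch ∧ k' < (pvM K h (pvBump u ch) : Int) := by
  intro keys
  induction keys with
  | nil => intro k ch k' hsc; simp [pvScan] at hsc
  | cons c rest ih =>
    intro k ch k' hsc
    by_cases hp : u c < h c
    · simp only [pvScan, if_pos hp] at hsc
      by_cases hk : k < (pvM K h (pvBump u c) : Int)
      · simp only [if_pos hk, Option.some.injEq, Prod.mk.injEq] at hsc
        obtain ⟨rfl, rfl⟩ := hsc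
        exact ⟨List.mem_cons_self, hp, hk⟩
      · simp only [if_neg hk] at hsc
        obtain ⟨hm, hlt, hk'⟩ := ih _ _ _ hsc
        exact ⟨List.mem_cons_of_mem c hm, hlt, hk'⟩
    · simp only [pvScan, if_neg hp] at hsc
      obtain ⟨hm, hlt, hk'⟩ := ih _ _ _ hsc
      exact ⟨List.mem_cons_of_mem c hm, hlt, hk'⟩

-- ---- dictionary bookkeeping ----

-- folding key-indexed inserts into a dict that contains none of the (distinct) keys
theorem pvFoldInsert_items {ν : Type} (f : Char → ν) :
    ∀ (xs : List Char) (d : PySem.Dict Char ν),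
      (∀ c ∈ xs, d.contains c = false) → xs.Nodup →
      (xs.foldl (fun d c => d.insert c (f c)) d).items
        = d.items ++ xs.map (fun c => (c, f c)) := by
  intro xs
  induction xs with
  | nil => intro d _ _; simp
  | cons c rest ih =>
    intro d hd hnd
    rw [List.nodup_cons] at hnd
    have hcf : d.contains c = false := hd c List.mem_cons_self
    simp only [List.foldl_cons]
    rw [ih (d.insert c (f c)) ?_ hnd.2]
    · simp [PySem.Dict.insert, hcf]
    · intro c' hc'
      rw [PySem.Dict.contains_insert]
      have hne : c' ≠ c := fun he => hnd.1 (he ▸ hc')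
      simp [hne, hd c' (List.mem_cons_of_mem c hc')]

-- lookup in a dict of key-indexed pairs
theorem pvGetD_mk_map {ν : Type} (f : Char → ν) :
    ∀ (xs : List Char) (x : Char) (d0 : ν),
      (PySem.Dict.mk (xs.map (fun c => (c, f c)))).getD x d0
        = if x ∈ xs then f x else d0 := by
  intro xs
  induction xs with
  | nil => intro x d0; simp [PySem.Dict.getD, PySem.Dict.get?]
  | cons c rest ih =>
    intro x d0
    simp only [List.map_cons]
    unfold PySem.Dict.getD at ih ⊢
    rw [PySem.Dict.get?_mk_cons]
    by_cases hx : c = x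
    · subst hx
      simp
    · have hb : (c == x) = false := by simp [hx]
      rw [hb]
      simp only [Bool.false_eq_true, if_false, ih x d0]
      have hxne : x ≠ c := fun h => hx h.symm
      simp [List.mem_cons, hxne]

-- ---- canonical data extracted from the input string ----
def pvDl (cs : List Char) : List Char := PySem.Set.ofList cs
def pvH (cs : List Char) (c : Char) : Nat := cs.count c / 2
def pvKs (cs : List Char) : List Char := PySem.List.sorted (pvDl cs) (fun x => x)
def pvHc (cs : List Char) : PySem.Dict Char Int :=
  PySem.Dict.mk ((pvDl cs).map (fun c => (c, (pvH cs c : Int))))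

theorem pvDl_nodup (cs : List Char) : (pvDl cs).Nodup := PySem.Set.nodup_ofList cs
theorem pvKs_perm (cs : List Char) : (pvKs cs).Perm (pvDl cs) := PySem.List.sorted_perm _ _ _
theorem pvKs_nodup (cs : List Char) : (pvKs cs).Nodup :=
  ((pvKs_perm cs).nodup_iff).mpr (pvDl_nodup cs)
theorem pvKs_mem (cs : List Char) (c : Char) : c ∈ pvKs cs ↔ c ∈ pvDl cs :=
  (pvKs_perm cs).mem_iff
theorem pvHc_keys (cs : List Char) : (pvHc cs).keys = pvDl cs := by
  simp [pvHc, PySem.Dict.keys, Function.comp_def]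
theorem pvHc_getD (cs : List Char) (c : Char) :
    (pvHc cs).getD c 0 = if c ∈ pvDl cs then (pvH cs c : Int) else 0 :=
  pvGetD_mk_map _ (pvDl cs) c 0
-- a character outside the distinct list has count 0, hence half count 0
theorem pvH_notmem (cs : List Char) (c : Char) (hc : c ∉ pvDl cs) : pvH cs c = 0 := by
  have : c ∉ cs := fun h => hc (by simpa [pvDl] using (PySem.Set.mem_ofList cs c).mpr h)
  simp [pvH, List.count_eq_zero_of_not_mem this]
theorem pvHc_getD' (cs : List Char) (c : Char) :
    (pvHc cs).getD c 0 = (pvH cs c : Int) := by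
  rw [pvHc_getD]
  by_cases hc : c ∈ pvDl cs
  · rw [if_pos hc]
  · rw [if_neg hc, pvH_notmem cs c hc]
    simp

-- A's inner perms computation equals the abstract multinomial
theorem pvCountPal_remd (cs : List Char) (U1 : PySem.Dict Char Int) (u1 : Char → Nat)
    (hU1 : ∀ c, U1.getD c 0 = (u1 c : Int))
    (hle : ∀ c, u1 c ≤ pvH cs c) :
    pvCountPal (pvRemDict (pvHc cs) U1)
      = (pvM (pvKs cs) (pvH cs) u1 : Int) := by
  have hitems : (pvRemDict (pvHc cs) U1).items
      = (pvDl cs).map (fun c => (c, (pvHc cs).getD c 0 - U1.getD c 0)) := by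
    unfold pvRemDict
    have h0 : (pvHc cs).items = (pvDl cs).map (fun c => (c, (pvH cs c : Int))) := rfl
    rw [h0, List.foldl_map]
    have := pvFoldInsert_items (fun c => (pvHc cs).getD c 0 - U1.getD c 0) (pvDl cs)
        PySem.Dict.empty (by intro c _; rfl) (pvDl_nodup cs)
    simpa using this
  have hvals : (pvRemDict (pvHc cs) U1).values
      = ((pvDl cs).map (pvR (pvH cs) u1)).map (Nat.cast : Nat → Int) := by
    unfold PySem.Dict.values
    rw [hitems, List.map_map, List.map_map]
    apply List.map_congr_left
    intro c _
    simp only [Function.comp]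
    rw [pvHc_getD' cs c, hU1 c]
    have := hle c
    unfold pvR
    omega
  have hfold : ∀ (l : List Int), l.foldl (fun d v => d * pvFact v) 1 = (l.map pvFact).prod := by
    intro l
    rw [List.prod_eq_foldl, List.foldl_map]
  have hpermR : ((pvDl cs).map (pvR (pvH cs) u1)).Perm ((pvKs cs).map (pvR (pvH cs) u1)) :=
    ((pvKs_perm cs).map _).symm
  unfold pvCountPal
  rw [hvals, hfold]
  have hsum : (((pvDl cs).map (pvR (pvH cs) u1)).map (Nat.cast : Nat → Int)).sum
      = ((pvT (pvKs cs) (pvH cs) u1 : Nat) : Int) := by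
    rw [← Nat.cast_list_sum]
    unfold pvT
    exact_mod_cast hpermR.sum_eq
  have hprod : ((((pvDl cs).map (pvR (pvH cs) u1)).map (Nat.cast : Nat → Int)).map pvFact).prod
      = (((((pvKs cs).map (pvR (pvH cs) u1)).map Nat.factorial).prod : Nat) : Int) := by
    rw [List.map_map]
    have : ((fun v => pvFact v) ∘ (Nat.cast : Nat → Int))
        = (Nat.cast : Nat → Int) ∘ Nat.factorial := by
      funext n
      simp [pvFact]
    rw [this, ← List.map_map, ← Nat.cast_list_prod]
    exact_mod_cast (hpermR.map Nat.factorial).prod_eq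
  rw [hsum, hprod]
  dsimp only
  have hfact : pvFact ((pvT (pvKs cs) (pvH cs) u1 : Nat) : Int)
      = (((pvT (pvKs cs) (pvH cs) u1).factorial : Nat) : Int) := by
    simp [pvFact]
  rw [hfact]
  unfold pvM pvMulti pvT
  exact PySem.Int.floordiv_natCast ((List.map (pvR (pvH cs) u1) (pvKs cs)).sum.factorial)
    ((List.map Nat.factorial (List.map (pvR (pvH cs) u1) (pvKs cs))).prod)

-- A's inner for-pass implements the abstract scan (break case; under the loop invariant
-- the scan never fails, so the no-break case is never consulted)
theorem pvInnerA_eq (cs : List Char) :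
    ∀ (keys : List Char) (U : PySem.Dict Char Int) (u : Char → Nat)
      (result : List Char) (k : Int),
      (∀ c ∈ keys, c ∈ pvKs cs) →
      (∀ c, U.getD c 0 = (u c : Int)) →
      (∀ c, u c ≤ pvH cs c) →
      (∀ ch k', pvScan (pvKs cs) (pvH cs) u keys k = some (ch, k') →
         ∃ U2, pvInnerA (pvHc cs) U result k keys = Sum.inr (U2, result ++ [ch], k')
           ∧ ∀ c, U2.getD c 0 = (pvBump u ch c : Int)) := by
  intro keys
  induction keys with
  | nil =>
    intro U u result k _ _ _ ch k' hsc
    simp [pvScan] at hsc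
  | cons c rest ih =>
    intro U u result k hsub hU hle ch k' hsc
    have hguard : (U.getD c 0 < (pvHc cs).getD c 0) ↔ (u c < pvH cs c) := by
      rw [hU c, pvHc_getD' cs c]
      exact Nat.cast_lt
    by_cases hp : u c < pvH cs c
    · have hg : U.getD c 0 < (pvHc cs).getD c 0 := hguard.mpr hp
      have hU1 : ∀ x, (U.insert c (U.getD c 0 + 1)).getD x 0 = ((pvBump u c x : Nat) : Int) := by
        intro x
        by_cases hx : x = c
        · subst hx
          rw [PySem.Dict.getD_insert_self, hU x]
          unfold pvBump
          rw [if_pos rfl]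
          omega
        · rw [PySem.Dict.getD_insert_of_ne _ _ _ hx, hU x]
          unfold pvBump
          rw [if_neg hx]
      have hperms : pvCountPal (pvRemDict (pvHc cs) (U.insert c (U.getD c 0 + 1)))
          = (pvM (pvKs cs) (pvH cs) (pvBump u c) : Int) := by
        apply pvCountPal_remd cs _ (pvBump u c) hU1
        intro x
        unfold pvBump
        by_cases hx : x = c
        · rw [if_pos hx]; subst hx; omega
        · rw [if_neg hx]; exact hle x
      have hU' : ∀ x, ((U.insert c (U.getD c 0 + 1)).insert c
            ((U.insert c (U.getD c 0 + 1)).getD c 0 - 1)).getD x 0 = (u x : Int) := by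
        intro x
        by_cases hx : x = c
        · subst hx
          rw [PySem.Dict.getD_insert_self, hU1 x]
          unfold pvBump
          rw [if_pos rfl]
          omega
        · rw [PySem.Dict.getD_insert_of_ne _ _ _ hx, hU1 x]
          unfold pvBump
          rw [if_neg hx]
      simp only [pvScan, if_pos hp] at hsc
      by_cases hk : k < (pvM (pvKs cs) (pvH cs) (pvBump u c) : Int)
      · simp only [if_pos hk, Option.some.injEq, Prod.mk.injEq] at hsc
        obtain ⟨rfl, rfl⟩ := hsc
        refine ⟨U.insert c (U.getD c 0 + 1), ?_, hU1⟩
        simp only [pvInnerA, if_pos hg, hperms, if_pos hk]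
      · simp only [if_neg hk] at hsc
        obtain ⟨U2, heq, hU2⟩ :=
          ih _ u result _ (fun x hx => hsub x (List.mem_cons_of_mem c hx)) hU' hle ch k' hsc
        refine ⟨U2, ?_, hU2⟩
        simp only [pvInnerA, if_pos hg, hperms, if_neg hk]
        exact heq
    · have hg : ¬ (U.getD c 0 < (pvHc cs).getD c 0) := fun h => hp (hguard.mp h)
      simp only [pvScan, if_neg hp] at hsc
      obtain ⟨U2, heq, hU2⟩ :=
        ih U u result k (fun x hx => hsub x (List.mem_cons_of_mem c hx)) hU hle ch k' hsc
      refine ⟨U2, ?_, hU2⟩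
      simp only [pvInnerA, if_neg hg]
      exact heq

-- B's inner for-pass implements the abstract scan
theorem pvInnerB_eq (cs : List Char) :
    ∀ (halfs : List (Char × Int)) (C : PySem.Dict Char Int) (u : Char → Nat) (k : Int),
      (∀ p ∈ halfs, p.1 ∈ pvKs cs) →
      (∀ c, C.getD c 0 = (pvR (pvH cs) u c : Int)) →
      (∀ c, u c ≤ pvH cs c) →
      ((pvScan (pvKs cs) (pvH cs) u (halfs.map Prod.fst) k = none →
          pvInnerB C k (pvM (pvKs cs) (pvH cs) u : Int) (pvT (pvKs cs) (pvH cs) u : Int) halfs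
            = none)
       ∧ (∀ ch k', pvScan (pvKs cs) (pvH cs) u (halfs.map Prod.fst) k = some (ch, k') →
           pvInnerB C k (pvM (pvKs cs) (pvH cs) u : Int) (pvT (pvKs cs) (pvH cs) u : Int) halfs
             = some (C.insert ch ((pvR (pvH cs) u ch : Int) - 1), ch, k',
                 (pvM (pvKs cs) (pvH cs) (pvBump u ch) : Int)))) := by
  intro halfs
  induction halfs with
  | nil =>
    intro C u k _ _ _
    exact ⟨fun _ => rfl, fun ch k' hsc => by simp [pvScan] at hsc⟩
  | cons p rest ih =>
    obtain ⟨c, v⟩ := p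
    intro C u k hsub hC hle
    have hcK : c ∈ pvKs cs := hsub (c, v) List.mem_cons_self
    by_cases hp : u c < pvH cs c
    · have hRpos : 0 < pvR (pvH cs) u c := by unfold pvR; omega
      have hc0 : ¬ (C.getD c 0 = 0) := by
        rw [hC c]
        omega
      have hTpos : 0 < pvT (pvKs cs) (pvH cs) u := by
        have hm : pvR (pvH cs) u c ∈ (pvKs cs).map (pvR (pvH cs) u) :=
          List.mem_map_of_mem hcK
        have := List.le_sum_of_mem hm
        unfold pvT
        omega
      have hperms : PySem.Int.floordiv
            ((pvM (pvKs cs) (pvH cs) u : Int) * C.getD c 0)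
            ((pvT (pvKs cs) (pvH cs) u : Int))
          = (pvM (pvKs cs) (pvH cs) (pvBump u c) : Int) := by
        rw [hC c]
        have hmb := pvM_bump (pvKs cs) (pvH cs) u c hcK (pvKs_nodup cs) hp
        have hcast : ((pvM (pvKs cs) (pvH cs) u : Nat) : Int) * ((pvR (pvH cs) u c : Nat) : Int)
            = ((pvT (pvKs cs) (pvH cs) u : Nat) : Int)
                * ((pvM (pvKs cs) (pvH cs) (pvBump u c) : Nat) : Int) := by
          exact_mod_cast hmb
        rw [hcast, PySem.Int.floordiv_eq_ediv_of_pos (by exact_mod_cast hTpos)]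
        exact Int.mul_ediv_cancel_left _ (by exact_mod_cast hTpos.ne')
      constructor
      · intro hsc
        simp only [List.map_cons, pvScan, if_pos hp] at hsc
        by_cases hk : k < (pvM (pvKs cs) (pvH cs) (pvBump u c) : Int)
        · simp [if_pos hk] at hsc
        · simp only [if_neg hk] at hsc
          simp only [pvInnerB, if_neg hc0, hperms, if_neg hk]
          exact (ih C u _ (fun x hx => hsub x (List.mem_cons_of_mem _ hx)) hC hle).1 hsc
      · intro ch k' hsc
        simp only [List.map_cons, pvScan, if_pos hp] at hsc
        by_cases hk : k < (pvM (pvKs cs) (pvH cs) (pvBump u c) : Int)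
        · simp only [if_pos hk, Option.some.injEq, Prod.mk.injEq] at hsc
          obtain ⟨rfl, rfl⟩ := hsc
          simp only [pvInnerB, if_neg hc0, hperms, if_pos hk]
          rw [hC c]
        · simp only [if_neg hk] at hsc
          simp only [pvInnerB, if_neg hc0, hperms, if_neg hk]
          exact (ih C u _ (fun x hx => hsub x (List.mem_cons_of_mem _ hx)) hC hle).2 ch k' hsc
    · have hc0 : C.getD c 0 = 0 := by
        rw [hC c]
        unfold pvR
        have := hle c
        simp
        omega
      have hrest := ih C u k (fun x hx => hsub x (List.mem_cons_of_mem _ hx)) hC hle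
      constructor
      · intro hsc
        simp only [List.map_cons, pvScan, if_neg hp] at hsc
        simp only [pvInnerB, if_pos hc0]
        exact hrest.1 hsc
      · intro ch k' hsc
        simp only [List.map_cons, pvScan, if_neg hp] at hsc
        simp only [pvInnerB, if_pos hc0]
        exact hrest.2 ch k' hsc

-- the two whole loops agree, in lock step (A's fuel only needs to dominate the pass count)
theorem pvLoop_eq (cs : List Char) (n : Nat) :
    ∀ (fuel : Nat) (u : Char → Nat) (U C : PySem.Dict Char Int)
      (result : List Char) (k : Int),
      (∀ c, U.getD c 0 = (u c : Int)) →
      (∀ c, C.getD c 0 = (pvR (pvH cs) u c : Int)) →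
      (∀ c, u c ≤ pvH cs c) →
      pvT (pvKs cs) (pvH cs) u ≤ fuel →
      result.length + pvT (pvKs cs) (pvH cs) u = n →
      k < (pvM (pvKs cs) (pvH cs) u : Int) →
      pvLoopB ((pvKs cs).map (fun ch => (ch, (pvH cs ch : Int))))
          (pvT (pvKs cs) (pvH cs) u) C result k
          (pvM (pvKs cs) (pvH cs) u : Int) (pvT (pvKs cs) (pvH cs) u : Int)
        = some (pvLoopA (pvHc cs) n fuel U result k) := by
  intro fuel
  induction fuel with
  | zero =>
    intro u U C result k _ _ _ hfuel _ _
    have hT0 : pvT (pvKs cs) (pvH cs) u = 0 := by omega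
    rw [hT0]
    rfl
  | succ fuel ih =>
    intro u U C result k hU hC hle hfuel hlen hk
    by_cases hT : pvT (pvKs cs) (pvH cs) u = 0
    · rw [hT]
      show some result = _
      simp only [pvLoopA]
      rw [if_neg (by omega)]
    · have hTpos : 0 < pvT (pvKs cs) (pvH cs) u := by omega
      have hgB : (0 : Int) < (pvT (pvKs cs) (pvH cs) u : Int) := by exact_mod_cast hTpos
      have hgA : result.length < n := by omega
      obtain ⟨ch, k', hscan⟩ :=
        pvScan_total (pvKs cs) (pvH cs) u k (pvKs_nodup cs) hTpos hk
      obtain ⟨hchmem, hchlt, hk'⟩ := pvScan_some (pvKs cs) (pvH cs) u _ _ _ _ hscan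
      have hKsA : PySem.List.sorted (pvHc cs).keys (fun x => x) = pvKs cs := by
        rw [pvHc_keys]
        rfl
      obtain ⟨U2, hAeq, hU2⟩ :=
        pvInnerA_eq cs (pvKs cs) U u result k (fun _ hc => hc) hU hle ch k' hscan
      have hmapfst : ((pvKs cs).map (fun ch => (ch, (pvH cs ch : Int)))).map Prod.fst
          = pvKs cs := by
        rw [List.map_map]
        simp [Function.comp_def]
      have hB := (pvInnerB_eq cs ((pvKs cs).map (fun ch => (ch, (pvH cs ch : Int)))) C u k
          (by intro p hp; obtain ⟨x, hx, rfl⟩ := List.mem_map.mp hp; exact hx) hC hle).2 ch k'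
          (by rw [hmapfst]; exact hscan)
      have hC' : ∀ c, (C.insert ch ((pvR (pvH cs) u ch : Int) - 1)).getD c 0
          = ((pvR (pvH cs) (pvBump u ch) c : Nat) : Int) := by
        intro c
        by_cases hx : c = ch
        · subst hx
          rw [PySem.Dict.getD_insert_self]
          unfold pvR pvBump
          rw [if_pos rfl]
          have := hle c
          omega
        · rw [PySem.Dict.getD_insert_of_ne _ _ _ hx]
          rw [hC c]
          unfold pvR pvBump
          rw [if_neg hx]
      have hle' : ∀ c, pvBump u ch c ≤ pvH cs c := by
        intro c
        unfold pvBump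
        by_cases hx : c = ch
        · rw [if_pos hx]; subst hx; omega
        · rw [if_neg hx]; exact hle c
      have hT' : pvT (pvKs cs) (pvH cs) (pvBump u ch) = pvT (pvKs cs) (pvH cs) u - 1 :=
        pvT_bump (pvKs cs) (pvH cs) u ch hchmem (pvKs_nodup cs) hchlt
      have hfuel' : pvT (pvKs cs) (pvH cs) (pvBump u ch) ≤ fuel := by omega
      have hlen' : (result ++ [ch]).length + pvT (pvKs cs) (pvH cs) (pvBump u ch) = n := by
        simp only [List.length_append, List.length_cons, List.length_nil]
        omega
      have ihx := ih (pvBump u ch) U2 (C.insert ch ((pvR (pvH cs) u ch : Int) - 1))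
          (result ++ [ch]) k' hU2 hC' hle' hfuel' hlen' hk'
      obtain ⟨T', hTsucc⟩ : ∃ T', pvT (pvKs cs) (pvH cs) u = T' + 1 :=
        ⟨pvT (pvKs cs) (pvH cs) u - 1, by omega⟩
      rw [hTsucc] at hB
      rw [hTsucc]
      show pvLoopB _ (T' + 1) _ _ _ _ _ = _
      rw [pvLoopB, if_pos (by rw [← hTsucc]; exact hgB), hB]
      rw [pvLoopA, if_pos hgA, hKsA, hAeq]
      rw [show ((T' + 1 : Nat) : Int) - 1 = ((pvT (pvKs cs) (pvH cs) (pvBump u ch) : Nat) : Int)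
        by push_cast; omega]
      rw [show T' = pvT (pvKs cs) (pvH cs) (pvBump u ch) by omega]
      exact ihx

-- ---- B's factorial table ----
theorem pvFactTable_aux :
    ∀ (m : Nat) (tail : List Int),
      (PySem.List.pyRange 1 ((m : Int) + 1) 1).foldl
          (fun f i => f.set i.toNat (PySem.List.pyGetD f (i - 1) 0 * i))
          (List.replicate (m + 1) 1 ++ tail)
        = (List.range (m + 1)).map (fun i => (Nat.factorial i : Int)) ++ tail := by
  intro m
  induction m with
  | zero =>
    intro tail
    have h0 : PySem.List.pyRange 1 ((0 : Nat) + 1 : Int) 1 = [] := by decide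
    rw [h0]
    simp
  | succ m ih =>
    intro tail
    have hcast : ((m + 1 : Nat) : Int) + 1 = ((m : Int) + 1) + 1 := by push_cast; ring
    have hrange : PySem.List.pyRange 1 (((m + 1 : Nat) : Int) + 1) 1
        = PySem.List.pyRange 1 ((m : Int) + 1) 1 ++ [(m : Int) + 1] := by
      rw [hcast, PySem.List.pyRange_one_succ_right (by omega)]
    have hinit : List.replicate (m + 1 + 1) (1 : Int) ++ tail
        = List.replicate (m + 1) 1 ++ (1 :: tail) := by
      rw [List.replicate_succ']
      simp
    rw [hrange, List.foldl_append, hinit, ih (1 :: tail)]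
    -- one final update step, at index m+1
    have hidx : ((m : Int) + 1).toNat = m + 1 := by omega
    have hidx' : (m : Int) + 1 - 1 = ((m : Nat) : Int) := by ring
    simp only [List.foldl_cons, List.foldl_nil, hidx, hidx', PySem.List.pyGetD_natCast]
    have hlen : ((List.range (m + 1)).map (fun i => (Nat.factorial i : Int))).length = m + 1 := by
      simp
    have hget : ((List.range (m + 1)).map (fun i => (Nat.factorial i : Int)) ++ 1 :: tail).getD m 0
        = ((m.factorial : Nat) : Int) := by
      rw [List.getD_append _ _ _ _ (by simp)]
      simp [List.getD_eq_getElem?_getD]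
    rw [hget]
    have hset : ((List.range (m + 1)).map (fun i => (Nat.factorial i : Int)) ++ 1 :: tail).set
          (m + 1) (((m.factorial : Nat) : Int) * ((m : Int) + 1))
        = (List.range (m + 1)).map (fun i => (Nat.factorial i : Int))
            ++ (((m.factorial : Nat) : Int) * ((m : Int) + 1)) :: tail := by
      rw [List.set_append_right _ _ (by omega)]
      simp [hlen]
    have hv : ((m.factorial : Nat) : Int) * ((m : Int) + 1) = (((m + 1).factorial : Nat) : Int) := by
      rw [Nat.factorial_succ]
      push_cast
      ring
    rw [hset, hv]
    rw [show List.range (m + 1 + 1) = List.range (m + 1) ++ [m + 1] from List.range_succ]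
    simp

theorem pvFactTable_get (m c : Nat) (hc : c ≤ m) :
    PySem.List.pyGetD (pvFactTable ((m : Nat) : Int)) ((c : Nat) : Int) 0
      = ((c.factorial : Nat) : Int) := by
  unfold pvFactTable
  rw [show (((m : Nat) : Int) + 1).toNat = m + 1 by omega]
  have haux := pvFactTable_aux m []
  rw [List.append_nil] at haux
  rw [haux, PySem.List.pyGetD_natCast]
  rw [List.getD_append _ _ _ _ (by simp; omega)]
  simp [List.getD_eq_getElem?_getD, Nat.lt_succ_of_le hc]

-- ---- top-level bookkeeping ----
theorem pvR_zero (cs : List Char) : pvR (pvH cs) (fun _ => 0) = pvH cs := by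
  funext c
  simp [pvR]

-- A's half_counter dict is pvHc
theorem pvHcA (cs : List Char) :
    (PySem.Dict.counter cs).items.foldl
        (fun d p => d.insert p.1 (PySem.Int.floordiv p.2 2)) PySem.Dict.empty
      = pvHc cs := by
  rw [PySem.Dict.items_counter, List.foldl_map]
  apply PySem.Dict.ext
  rw [pvFoldInsert_items (fun c => PySem.Int.floordiv ((cs.count c : Nat) : Int) 2)
      (PySem.Set.ofList cs) PySem.Dict.empty (fun _ _ => rfl) (pvDl_nodup cs)]
  show (PySem.Set.ofList cs).map _ = (pvDl cs).map _
  apply List.map_congr_left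
  intro c _
  have : PySem.Int.floordiv ((cs.count c : Nat) : Int) 2 = ((cs.count c / 2 : Nat) : Int) := by
    exact_mod_cast PySem.Int.floordiv_natCast (cs.count c) 2
  rw [this]
  rfl

-- B's sorted pair list
theorem pvHalfB (cs : List Char) :
    (PySem.List.sorted (PySem.Dict.counter cs).keys (fun x => x)).map
        (fun ch => (ch, PySem.Int.floordiv ((PySem.Dict.counter cs).getD ch 0) 2))
      = (pvKs cs).map (fun ch => (ch, (pvH cs ch : Int))) := by
  rw [PySem.Dict.keys_counter]
  apply List.map_congr_left
  intro c _
  rw [PySem.Dict.getD_counter]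
  have : PySem.Int.floordiv ((cs.count c : Nat) : Int) 2 = ((cs.count c / 2 : Nat) : Int) := by
    exact_mod_cast PySem.Int.floordiv_natCast (cs.count c) 2
  rw [this]
  rfl

-- the length of A's half_chars list is the total half count
theorem pvFoldRepLen (g : Char → Nat) :
    ∀ (xs : List Char) (acc : List Char),
      (xs.foldl (fun acc ch => acc ++ List.replicate (g ch) ch) acc).length
        = acc.length + (xs.map g).sum := by
  intro xs
  induction xs with
  | nil => intro acc; simp
  | cons c rest ih =>
    intro acc
    simp only [List.foldl_cons, List.map_cons, List.sum_cons]
    rw [ih]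
    simp
    omega

-- B's initial counts dict
theorem pvCountsB (cs : List Char) (c : Char) :
    (PySem.Dict.ofList ((pvKs cs).map (fun ch => (ch, (pvH cs ch : Int))))).getD c 0
      = ((pvR (pvH cs) (fun _ => 0) c : Nat) : Int) := by
  show ((((pvKs cs).map (fun ch => (ch, (pvH cs ch : Int)))).foldl
      (fun acc p => acc.insert p.1 p.2) PySem.Dict.empty)).getD c 0 = _
  rw [List.foldl_map]
  have hit := pvFoldInsert_items (fun ch => ((pvH cs ch : Nat) : Int)) (pvKs cs)
      PySem.Dict.empty (fun _ _ => rfl) (pvKs_nodup cs)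
  have hd : ((pvKs cs).foldl (fun d ch => d.insert ch ((pvH cs ch : Nat) : Int)) PySem.Dict.empty)
      = PySem.Dict.mk ((pvKs cs).map (fun ch => (ch, ((pvH cs ch : Nat) : Int)))) :=
    PySem.Dict.ext (by simpa using hit)
  rw [hd, pvGetD_mk_map]
  rw [pvR_zero]
  by_cases hc : c ∈ pvKs cs
  · rw [if_pos hc]
  · rw [if_neg hc, pvH_notmem cs c (fun hm => hc ((pvKs_mem cs c).mpr hm))]
    simp

theorem pvTsum (cs : List Char) :
    pvT (pvKs cs) (pvH cs) (fun _ => 0) = ((pvKs cs).map (pvH cs)).sum := by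
  unfold pvT
  rw [pvR_zero]

-- B's t expression
theorem pvTB (cs : List Char) :
    (((pvKs cs).map (fun ch => (ch, (pvH cs ch : Int)))).map Prod.snd).sum
      = ((pvT (pvKs cs) (pvH cs) (fun _ => 0) : Nat) : Int) := by
  rw [List.map_map]
  have h1 : (pvKs cs).map (Prod.snd ∘ fun ch => (ch, (pvH cs ch : Int)))
      = ((pvKs cs).map (pvH cs)).map (Nat.cast : Nat → Int) := by
    rw [List.map_map]
    rfl
  rw [h1, ← Nat.cast_list_sum, pvTsum]

-- B's rem expression
theorem pvRemB (cs : List Char) :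
    PySem.Int.floordiv
        (PySem.List.pyGetD (pvFactTable ((pvT (pvKs cs) (pvH cs) (fun _ => 0) : Nat) : Int))
          ((pvT (pvKs cs) (pvH cs) (fun _ => 0) : Nat) : Int) 0)
        (((pvKs cs).map (fun ch => (ch, (pvH cs ch : Int)))).foldl
          (fun d p => d * PySem.List.pyGetD
            (pvFactTable ((pvT (pvKs cs) (pvH cs) (fun _ => 0) : Nat) : Int)) p.2 0) 1)
      = ((pvM (pvKs cs) (pvH cs) (fun _ => 0) : Nat) : Int) := by
  rw [pvFactTable_get _ _ le_rfl]
  have hfold : ∀ (l : List (Char × Int)) (g : Char × Int → Int),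
      l.foldl (fun d p => d * g p) (1 : Int) = (l.map g).prod := by
    intro l g
    rw [List.prod_eq_foldl, List.foldl_map]
  rw [hfold, List.map_map]
  have hmap : ((pvKs cs).map ((fun p : Char × Int =>
        PySem.List.pyGetD (pvFactTable ((pvT (pvKs cs) (pvH cs) (fun _ => 0) : Nat) : Int)) p.2 0)
          ∘ fun ch => (ch, (pvH cs ch : Int))))
      = (((pvKs cs).map (pvH cs)).map Nat.factorial).map (Nat.cast : Nat → Int) := by
    rw [List.map_map, List.map_map]
    apply List.map_congr_left
    intro c hc
    simp only [Function.comp]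
    have hle : pvH cs c ≤ pvT (pvKs cs) (pvH cs) (fun _ => 0) := by
      rw [pvTsum]
      exact List.le_sum_of_mem (List.mem_map_of_mem hc)
    exact pvFactTable_get _ _ hle
  rw [hmap, ← Nat.cast_list_prod,
    PySem.Int.floordiv_natCast ((pvT (pvKs cs) (pvH cs) (fun _ => 0)).factorial)
      ((((pvKs cs).map (pvH cs)).map Nat.factorial).prod)]
  unfold pvM pvMulti
  rw [pvR_zero, pvTsum]

-- A's inner for-pass with no break: it lowers k by the number of permutations still
-- reachable through the scanned candidates and leaves the used counts unchanged
theorem pvInnerA_exhaust (cs : List Char) :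
    ∀ (keys : List Char) (U : PySem.Dict Char Int) (u : Char → Nat)
      (result : List Char) (k : Int),
      (∀ c ∈ keys, c ∈ pvKs cs) →
      (∀ c, U.getD c 0 = (u c : Int)) →
      (∀ c, u c ≤ pvH cs c) →
      (((keys.filter (fun c => decide (u c < pvH cs c))).map
          (fun c => pvM (pvKs cs) (pvH cs) (pvBump u c))).sum : Int) ≤ k →
      ∃ U2, pvInnerA (pvHc cs) U result k keys
          = Sum.inl (U2, k - (((keys.filter (fun c => decide (u c < pvH cs c))).map
              (fun c => pvM (pvKs cs) (pvH cs) (pvBump u c))).sum : Int))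
        ∧ ∀ c, U2.getD c 0 = (u c : Int) := by
  intro keys
  induction keys with
  | nil =>
    intro U u result k _ hU _ _
    exact ⟨U, by simp [pvInnerA], hU⟩
  | cons c rest ih =>
    intro U u result k hsub hU hle hk
    have hguard : (U.getD c 0 < (pvHc cs).getD c 0) ↔ (u c < pvH cs c) := by
      rw [hU c, pvHc_getD' cs c]
      exact Nat.cast_lt
    by_cases hp : u c < pvH cs c
    · rw [List.filter_cons_of_pos (by simpa using hp), List.map_cons, List.sum_cons] at hk ⊢
      have hg : U.getD c 0 < (pvHc cs).getD c 0 := hguard.mpr hp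
      have hU1 : ∀ x, (U.insert c (U.getD c 0 + 1)).getD x 0 = ((pvBump u c x : Nat) : Int) := by
        intro x
        by_cases hx : x = c
        · subst hx
          rw [PySem.Dict.getD_insert_self, hU x]
          unfold pvBump
          rw [if_pos rfl]
          omega
        · rw [PySem.Dict.getD_insert_of_ne _ _ _ hx, hU x]
          unfold pvBump
          rw [if_neg hx]
      have hperms : pvCountPal (pvRemDict (pvHc cs) (U.insert c (U.getD c 0 + 1)))
          = (pvM (pvKs cs) (pvH cs) (pvBump u c) : Int) := by
        apply pvCountPal_remd cs _ (pvBump u c) hU1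
        intro x
        unfold pvBump
        by_cases hx : x = c
        · rw [if_pos hx]; subst hx; omega
        · rw [if_neg hx]; exact hle x
      have hU' : ∀ x, ((U.insert c (U.getD c 0 + 1)).insert c
            ((U.insert c (U.getD c 0 + 1)).getD c 0 - 1)).getD x 0 = (u x : Int) := by
        intro x
        by_cases hx : x = c
        · subst hx
          rw [PySem.Dict.getD_insert_self, hU1 x]
          unfold pvBump
          rw [if_pos rfl]
          omega
        · rw [PySem.Dict.getD_insert_of_ne _ _ _ hx, hU1 x]
          unfold pvBump
          rw [if_neg hx]
      have hnb : ¬ k < (pvM (pvKs cs) (pvH cs) (pvBump u c) : Int) := by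
        omega
      obtain ⟨U2, heq, hU2⟩ := ih _ u result (k - (pvM (pvKs cs) (pvH cs) (pvBump u c) : Int))
          (fun x hx => hsub x (List.mem_cons_of_mem c hx)) hU' hle
          (by omega)
      refine ⟨U2, ?_, hU2⟩
      simp only [pvInnerA, if_pos hg, hperms, if_neg hnb]
      rw [heq]
      congr 1
      push_cast
      ring_nf
    · rw [List.filter_cons_of_neg (by simpa using hp)] at hk ⊢
      have hg : ¬ (U.getD c 0 < (pvHc cs).getD c 0) := fun h => hp (hguard.mp h)
      obtain ⟨U2, heq, hU2⟩ :=
        ih U u result k (fun x hx => hsub x (List.mem_cons_of_mem c hx)) hU hle hk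
      refine ⟨U2, ?_, hU2⟩
      simp only [pvInnerA, if_neg hg]
      exact heq

-- the full loops: A first burns whole passes, lowering k by the permutation count each time
-- (that is, it reduces k modulo the count), then proceeds in range; B wraps k up front
theorem pvLoopFull (cs : List Char) (n : Nat) :
    ∀ (fuel : Nat) (u : Char → Nat) (U C : PySem.Dict Char Int)
      (result : List Char) (k : Int),
      (∀ c, U.getD c 0 = (u c : Int)) →
      (∀ c, C.getD c 0 = (pvR (pvH cs) u c : Int)) →
      (∀ c, u c ≤ pvH cs c) →
      pvT (pvKs cs) (pvH cs) u + k.toNat + 1 ≤ fuel →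
      result.length + pvT (pvKs cs) (pvH cs) u = n →
      pvLoopB ((pvKs cs).map (fun ch => (ch, (pvH cs ch : Int))))
          (pvT (pvKs cs) (pvH cs) u) C result
          (if (pvM (pvKs cs) (pvH cs) u : Int) ≤ k
            then PySem.Int.mod k (pvM (pvKs cs) (pvH cs) u : Int) else k)
          (pvM (pvKs cs) (pvH cs) u : Int) (pvT (pvKs cs) (pvH cs) u : Int)
        = some (pvLoopA (pvHc cs) n fuel U result k) := by
  intro fuel
  induction fuel with
  | zero =>
    intro u U C result k _ _ _ hfuel _
    omega
  | succ fuel ih =>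
    intro u U C result k hU hC hle hfuel hlen
    by_cases hT : pvT (pvKs cs) (pvH cs) u = 0
    · rw [hT]
      show some result = _
      simp only [pvLoopA]
      rw [if_neg (by omega)]
    · have hMpos : 0 < pvM (pvKs cs) (pvH cs) u := by
        unfold pvM
        exact pvMulti_pos _
      have hKsA : PySem.List.sorted (pvHc cs).keys (fun x => x) = pvKs cs := by
        rw [pvHc_keys]
        rfl
      by_cases hwrap : (pvM (pvKs cs) (pvH cs) u : Int) ≤ k
      · -- a whole pass fails; k drops by the permutation count
        have hCh := pvScan_children (pvKs cs) (pvH cs) u (pvKs_nodup cs) (by omega)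
        obtain ⟨U2, hAeq, hU2⟩ := pvInnerA_exhaust cs (pvKs cs) U u result k
            (fun _ h => h) hU hle (by rw [hCh]; exact hwrap)
        rw [hCh] at hAeq
        have hstep : pvLoopA (pvHc cs) n (fuel + 1) U result k
            = pvLoopA (pvHc cs) n fuel U2 result
                (k - (pvM (pvKs cs) (pvH cs) u : Int)) := by
          rw [pvLoopA, if_pos (by omega : result.length < n), hKsA, hAeq]
        rw [hstep, if_pos hwrap]
        have ihx := ih u U2 C result (k - (pvM (pvKs cs) (pvH cs) u : Int))
            hU2 hC hle (by omega) hlen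
        have hmodeq : (if (pvM (pvKs cs) (pvH cs) u : Int)
              ≤ k - (pvM (pvKs cs) (pvH cs) u : Int)
            then PySem.Int.mod (k - (pvM (pvKs cs) (pvH cs) u : Int))
              (pvM (pvKs cs) (pvH cs) u : Int)
            else k - (pvM (pvKs cs) (pvH cs) u : Int))
            = PySem.Int.mod k (pvM (pvKs cs) (pvH cs) u : Int) := by
          have hMpos' : (0 : Int) < (pvM (pvKs cs) (pvH cs) u : Int) := by exact_mod_cast hMpos
          by_cases h2 : (pvM (pvKs cs) (pvH cs) u : Int)
              ≤ k - (pvM (pvKs cs) (pvH cs) u : Int)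
          · rw [if_pos h2, PySem.Int.mod_eq_emod_of_pos hMpos',
              PySem.Int.mod_eq_emod_of_pos hMpos', Int.sub_emod_right]
          · rw [if_neg h2, PySem.Int.mod_eq_emod_of_pos hMpos', ← Int.sub_emod_right]
            have h3 : (0 : Int) ≤ k - (pvM (pvKs cs) (pvH cs) u : Int) := by omega
            have h4 : k - (pvM (pvKs cs) (pvH cs) u : Int)
                < (pvM (pvKs cs) (pvH cs) u : Int) := by omega
            exact (Int.emod_eq_of_lt h3 h4).symm
        rw [hmodeq] at ihx
        exact ihx
      · rw [if_neg hwrap]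
        exact pvLoop_eq cs n (fuel + 1) u U C result k hU hC hle (by omega) hlen (by omega)

-- ===== VERDICT (by name: the statement is the Claim_ definition above) =====
theorem kth_palindromic_permutation_spec : Claim_equal_kth_palindromic_permutation := by
  intro s k _hdom
  unfold Spec_kth_palindromic_permutation kth_palindromic_permutation
    kth_palindromic_permutation_alt
  rw [PySem.Dict.foldl_insert_getD_add_one_eq_counter]
  by_cases hodd : (((PySem.Dict.counter s.toList).items.filter
      (fun p => PySem.Int.mod p.2 2 == 1)).map Prod.fst).length > 1
  · rw [if_pos hodd, if_pos hodd]
  · rw [if_neg hodd, if_neg hodd]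
    dsimp only
    rw [pvHcA s.toList, pvHalfB s.toList, pvHc_keys s.toList]
    rw [show PySem.List.sorted (pvDl s.toList) (fun x => x) = pvKs s.toList from rfl]
    rw [pvTB s.toList, Int.toNat_natCast, pvRemB s.toList]
    have hn : ((pvKs s.toList).foldl
        (fun acc ch => acc ++ List.replicate (((pvHc s.toList).getD ch 0).toNat) ch) []).length
        = pvT (pvKs s.toList) (pvH s.toList) (fun _ => 0) := by
      rw [pvFoldRepLen]
      have : (pvKs s.toList).map (fun ch => ((pvHc s.toList).getD ch 0).toNat)
          = (pvKs s.toList).map (pvH s.toList) := by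
        apply List.map_congr_left
        intro c _
        rw [pvHc_getD' s.toList c]
        simp
      rw [this, pvTsum]
      simp
    rw [hn]
    have hloop := pvLoopFull s.toList (pvT (pvKs s.toList) (pvH s.toList) (fun _ => 0))
        (pvT (pvKs s.toList) (pvH s.toList) (fun _ => 0) + (k - 1).toNat + 1)
        (fun _ => 0) PySem.Dict.empty
        (PySem.Dict.ofList ((pvKs s.toList).map (fun ch => (ch, (pvH s.toList ch : Int)))))
        [] (k - 1)
        (fun c => by simp [PySem.Dict.getD_empty])
        (fun c => pvCountsB s.toList c)
        (fun c => Nat.zero_le _)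
        (by omega)
        (by simp)
    rw [hloop]
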